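-- pv_equiv track=rewrite | github.com/Fondamenti18/fondamenti-di-programmazione | students/1793127/homework04/program01.py | calc_ant_grad
-- ===== SOURCE A (Python) =====
-- def calc_ant_grad(r,diz,d,n):
-- 	m=0
-- 	d[r]=n
-- 	while m<len(diz[r]):
-- 		if len(diz[r])==2 and m==0:
-- 			n+=1
-- 		d=calc_ant_grad((diz[r])[m],diz,d,n)
-- 		m+=1
-- 	return d
-- ===== SOURCE B (Python) =====
-- def calc_ant_grad(r, diz, d, n):
--     # Iterative preorder DFS with an explicit stack instead of recursion.
--     # Mutates and returns the same dict d, like the original.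
--     stack = [(r, n)]
--     while stack:
--         node, g = stack.pop()
--         d[node] = g
--         children = diz[node]
--         childg = g + 1 if len(children) == 2 else g
--         for c in reversed(children):
--             stack.append((c, childg))
--     return d
-- ===== Notes on version B (the rewrite author's own statement) =====
-- stated objective: alternative
-- what changed: Replaces the recursive descent (one Python call frame per tree node, re-reading diz[r] in the loop condition) by an iterative preorder DFS over an explicit stack of (node, grade) pairs, computing each node's child grade once and pushing the children in reverse so the dict is filled in the identical order.
import Mathlib
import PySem

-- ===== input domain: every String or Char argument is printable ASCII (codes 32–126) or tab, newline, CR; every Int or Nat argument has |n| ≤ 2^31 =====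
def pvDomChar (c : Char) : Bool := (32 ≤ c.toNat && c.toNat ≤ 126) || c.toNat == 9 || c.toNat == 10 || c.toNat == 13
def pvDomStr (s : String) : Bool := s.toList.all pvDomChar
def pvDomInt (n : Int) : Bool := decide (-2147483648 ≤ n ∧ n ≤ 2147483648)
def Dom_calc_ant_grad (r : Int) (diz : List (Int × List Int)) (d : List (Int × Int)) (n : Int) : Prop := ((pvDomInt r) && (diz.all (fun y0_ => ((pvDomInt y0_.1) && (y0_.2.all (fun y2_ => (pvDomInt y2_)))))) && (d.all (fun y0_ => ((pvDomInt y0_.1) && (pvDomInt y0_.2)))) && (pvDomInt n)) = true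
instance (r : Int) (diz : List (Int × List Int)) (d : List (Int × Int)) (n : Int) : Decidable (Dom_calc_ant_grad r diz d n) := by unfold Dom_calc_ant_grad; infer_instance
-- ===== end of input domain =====

-- B replaces A's recursive descent by an iterative preorder DFS over an explicit stack (same
-- objective: alternative decomposition, not speed). A and B both MUTATE the dict d in place;
-- the equivalence proved here is about the RETURN value only.
-- Both ports model the Python dicts diz and d as PySem.Dict; the Nat fuel arguments are
-- totality guards only (Python recurses / loops without one); under Pre_ they are sufficient.

-- ===== PORT A =====
-- the body of A's while loop: m is the loop counter, rec is the recursive call at one level down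
def goChildrenA (rec : Int → PySem.Dict Int Int → Int → Option (PySem.Dict Int Int))
    (cs : List Int) (m : Nat) (d : PySem.Dict Int Int) (n : Int) : Option (PySem.Dict Int Int) :=
  if _h : m < cs.length then
    let n' := if cs.length = 2 ∧ m = 0 then n + 1 else n       -- if len(diz[r])==2 and m==0: n+=1
    match PySem.List.pyGet? cs (m : Int) with                   -- (diz[r])[m]
    | none => none
    | some c =>
      match rec c d n' with                                     -- d = calc_ant_grad(..., n)
      | none => none
      | some d' => goChildrenA rec cs (m+1) d' n'               -- m += 1
  else some d
termination_by cs.length - m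

def goA (diz : PySem.Dict Int (List Int)) : Nat → Int → PySem.Dict Int Int → Int → Option (PySem.Dict Int Int)
  | 0, _, _, _ => none                                          -- fuel exhausted (guard only)
  | fuel+1, r, d, n =>
    let d' := d.insert r n                                      -- d[r] = n
    match diz.get? r with                                       -- diz[r]; none = KeyError
    | none => none
    | some cs => goChildrenA (goA diz fuel) cs 0 d' n

def calc_ant_grad (r : Int) (diz : List (Int × List Int)) (d : List (Int × Int)) (n : Int) : List (Int × Int) :=
  match goA (PySem.Dict.mk diz) (diz.length + 1) r (PySem.Dict.mk d) n with
  | some d' => d'.items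
  | none => d                                                   -- unreachable under Pre_

-- ===== PORT B =====
-- max length of a child list in diz (only used to size B's loop-fuel guard)
def bmaxLen (diz : List (Int × List Int)) : Nat := (diz.map (·.2.length)).foldl max 0

-- B's while loop: the stack holds (node, grade) pairs, head = top of stack
def bloopB (diz : PySem.Dict Int (List Int)) : Nat → PySem.Dict Int Int → List (Int × Int) → Option (PySem.Dict Int Int)
  | _, d, [] => some d                                          -- while stack: … falls through
  | 0, _, _ :: _ => none                                        -- fuel exhausted (guard only)
  | fuel+1, d, (node, g) :: stack =>
    let d' := d.insert node g                                   -- d[node] = g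
    match diz.get? node with                                    -- diz[node]; none = KeyError
    | none => none
    | some cs =>
      let childg := if cs.length = 2 then g + 1 else g          -- childg = g+1 if len==2 else g
      bloopB diz fuel d' (cs.foldr (fun c st => (c, childg) :: st) stack)  -- push reversed(children)

def calc_ant_grad_alt (r : Int) (diz : List (Int × List Int)) (d : List (Int × Int)) (n : Int) : List (Int × Int) :=
  match bloopB (PySem.Dict.mk diz) ((bmaxLen diz + 1) ^ (diz.length + 1)) (PySem.Dict.mk d) [(r, n)] with
  | some d' => d'.items
  | none => d                                                   -- unreachable under Pre_

-- ===== PRECONDITION & SPEC =====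
-- Shape of the input graph, used only to state Pre_: keys of diz, children of a node,
-- one breadth step, and the reachable set (the step iterated enough times to close).
def pvKeysF (diz : List (Int × List Int)) : Finset Int := (diz.map (·.1)).toFinset
def pvChildF (diz : List (Int × List Int)) (x : Int) : Finset Int :=
  (((PySem.Dict.mk diz).get? x).getD []).toFinset
def pvStepF (diz : List (Int × List Int)) (S : Finset Int) : Finset Int :=
  S ∪ S.biUnion (pvChildF diz)
def pvN (diz : List (Int × List Int)) : Nat := Nat.succ (diz.flatMap (·.2)).length
def pvReach (diz : List (Int × List Int)) (S : Finset Int) : Finset Int :=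
  (pvStepF diz)^[pvN diz] S

-- Pre_: every node reachable from r is a key of diz and no reachable node is reachable from its
-- own children — i.e. the subgraph A explores is total and acyclic. This is exactly where the
-- Python A returns: a missing key raises KeyError and a reachable cycle never terminates.
def Pre_calc_ant_grad (r : Int) (diz : List (Int × List Int)) (d : List (Int × Int)) (n : Int) : Prop :=
  pvReach diz {r} ⊆ pvKeysF diz ∧ ∀ x ∈ pvReach diz {r}, x ∉ pvReach diz (pvChildF diz x)
instance (r : Int) (diz : List (Int × List Int)) (d : List (Int × Int)) (n : Int) : Decidable (Pre_calc_ant_grad r diz d n) := by unfold Pre_calc_ant_grad; infer_instance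

def pvWitness_calc_ant_grad : Int × (List (Int × List Int)) × (List (Int × Int)) × Int :=
  (0, [(0, [])], [], 0)

def Spec_calc_ant_grad (r : Int) (diz : List (Int × List Int)) (d : List (Int × Int)) (n : Int) (out : List (Int × Int)) : Prop := out = calc_ant_grad_alt r diz d n
instance (r : Int) (diz : List (Int × List Int)) (d : List (Int × Int)) (n : Int) (out : List (Int × Int)) : Decidable (Spec_calc_ant_grad r diz d n out) := by unfold Spec_calc_ant_grad; infer_instance

-- ===== CLAIM (what is proved, stated in full; the proofs are below) =====
def Claim_equal_calc_ant_grad : Prop := ∀ (r : Int) (diz : List (Int × List Int)) (d : List (Int × Int)) (n : Int), Dom_calc_ant_grad r diz d n → Pre_calc_ant_grad r diz d n → Spec_calc_ant_grad r diz d n (calc_ant_grad r diz d n)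

-- ===== LEMMAS AND PROOFS =====

-- ---- basic facts about the reachability closure ----

theorem subset_pvStepF (diz : List (Int × List Int)) (S : Finset Int) : S ⊆ pvStepF diz S := by
  intro x hx; exact Finset.mem_union_left _ hx

theorem pvStepF_mono (diz : List (Int × List Int)) {S T : Finset Int} (h : S ⊆ T) :
    pvStepF diz S ⊆ pvStepF diz T := by
  intro x hx
  rcases Finset.mem_union.1 hx with h1 | h2
  · exact Finset.mem_union_left _ (h h1)
  · rcases Finset.mem_biUnion.1 h2 with ⟨y, hy, hxy⟩
    exact Finset.mem_union_right _ (Finset.mem_biUnion.2 ⟨y, h hy, hxy⟩)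

theorem mem_of_get?_mk {diz : List (Int × List Int)} {x : Int} {cs : List Int}
    (h : (PySem.Dict.mk diz).get? x = some cs) : (x, cs) ∈ diz := by
  have := PySem.Dict.mem_items_of_get?_eq_some _ h
  simpa [PySem.Dict.items] using this

theorem pvChildF_subset_ubase (diz : List (Int × List Int)) (x : Int) :
    pvChildF diz x ⊆ (diz.flatMap (·.2)).toFinset := by
  unfold pvChildF
  cases h : (PySem.Dict.mk diz).get? x with
  | none => simp
  | some cs =>
    intro c hc
    simp only [Option.getD_some, List.mem_toFinset] at hc
    exact List.mem_toFinset.2 (List.mem_flatMap.2 ⟨(x, cs), mem_of_get?_mk h, hc⟩)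

theorem pvStepF_subset_union (diz : List (Int × List Int)) (S : Finset Int) :
    pvStepF diz S ⊆ S ∪ (diz.flatMap (·.2)).toFinset := by
  intro x hx
  rcases Finset.mem_union.1 hx with h1 | h2
  · exact Finset.mem_union_left _ h1
  · rcases Finset.mem_biUnion.1 h2 with ⟨y, _, hxy⟩
    exact Finset.mem_union_right _ (pvChildF_subset_ubase diz y hxy)

theorem pvIter_subset_union (diz : List (Int × List Int)) (S : Finset Int) (k : Nat) :
    (pvStepF diz)^[k] S ⊆ S ∪ (diz.flatMap (·.2)).toFinset := by
  induction k with
  | zero => simp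
  | succ k ih =>
    rw [Function.iterate_succ_apply']
    intro x hx
    rcases Finset.mem_union.1 (pvStepF_subset_union diz _ hx) with h1 | h2
    · exact ih h1
    · exact Finset.mem_union_right _ h2

theorem pvIter_expand (diz : List (Int × List Int)) (S : Finset Int) (k : Nat) :
    (pvStepF diz)^[k] S ⊆ (pvStepF diz)^[k+1] S := by
  rw [Function.iterate_succ_apply']
  exact subset_pvStepF diz _

theorem subset_pvIter (diz : List (Int × List Int)) (S : Finset Int) (k : Nat) :
    S ⊆ (pvStepF diz)^[k] S := by
  induction k with
  | zero => simp
  | succ k ih => exact ih.trans (pvIter_expand diz S k)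

theorem pvIter_dichotomy (diz : List (Int × List Int)) (S : Finset Int) (k : Nat) :
    (pvStepF diz)^[k] S = (pvStepF diz)^[k+1] S ∨ k + S.card ≤ ((pvStepF diz)^[k] S).card := by
  induction k with
  | zero => right; simp
  | succ k ih =>
    have step : (pvStepF diz)^[k] S = (pvStepF diz)^[k+1] S →
        (pvStepF diz)^[k+1] S = (pvStepF diz)^[k+1+1] S := by
      intro h
      calc (pvStepF diz)^[k+1] S = pvStepF diz ((pvStepF diz)^[k] S) :=
            Function.iterate_succ_apply' _ _ _
        _ = pvStepF diz ((pvStepF diz)^[k+1] S) := by rw [h]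
        _ = (pvStepF diz)^[k+1+1] S := (Function.iterate_succ_apply' _ _ _).symm
    rcases ih with h | h
    · exact Or.inl (step h)
    · by_cases he : (pvStepF diz)^[k] S = (pvStepF diz)^[k+1] S
      · exact Or.inl (step he)
      · right
        have hss : (pvStepF diz)^[k] S ⊂ (pvStepF diz)^[k+1] S :=
          (Finset.ssubset_iff_subset_ne).2 ⟨pvIter_expand diz S k, he⟩
        have := Finset.card_lt_card hss
        omega

theorem pvReach_fixed (diz : List (Int × List Int)) (S : Finset Int) :
    pvStepF diz (pvReach diz S) = pvReach diz S := by
  rcases pvIter_dichotomy diz S (pvN diz) with h | h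
  · rw [Function.iterate_succ_apply'] at h
    exact h.symm
  · exfalso
    have h1 : ((pvStepF diz)^[pvN diz] S).card ≤ (S ∪ (diz.flatMap (·.2)).toFinset).card :=
      Finset.card_le_card (pvIter_subset_union diz S _)
    have h2 : (S ∪ (diz.flatMap (·.2)).toFinset).card ≤ S.card + (diz.flatMap (·.2)).toFinset.card :=
      Finset.card_union_le _ _
    have h3 : (diz.flatMap (·.2)).toFinset.card ≤ (diz.flatMap (·.2)).length :=
      List.toFinset_card_le _
    have : pvN diz = (diz.flatMap (·.2)).length + 1 := rfl
    omega

theorem pvAbsorb (diz : List (Int × List Int)) {S T : Finset Int}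
    (hT : pvStepF diz T ⊆ T) (hST : S ⊆ T) (k : Nat) : (pvStepF diz)^[k] S ⊆ T := by
  induction k with
  | zero => simpa
  | succ k ih =>
    rw [Function.iterate_succ_apply']
    exact (pvStepF_mono diz ih).trans hT

theorem mem_pvReach_self (diz : List (Int × List Int)) (x : Int) : x ∈ pvReach diz {x} :=
  subset_pvIter diz {x} (pvN diz) (Finset.mem_singleton_self x)

theorem pvChildF_subset_reach (diz : List (Int × List Int)) (x : Int) :
    pvChildF diz x ⊆ pvReach diz {x} := by
  have h1 : pvChildF diz x ⊆ pvStepF diz {x} := by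
    intro c hc
    exact Finset.mem_union_right _ (Finset.mem_biUnion.2 ⟨x, Finset.mem_singleton_self x, hc⟩)
  have h2 : pvStepF diz {x} ⊆ pvStepF diz (pvReach diz {x}) :=
    pvStepF_mono diz (subset_pvIter diz {x} (pvN diz))
  rw [pvReach_fixed] at h2
  exact h1.trans h2

theorem pvReach_subset_of_mem (diz : List (Int × List Int)) {c : Int} {S : Finset Int}
    (h : c ∈ pvReach diz S) : pvReach diz {c} ⊆ pvReach diz S :=
  pvAbsorb diz (le_of_eq (pvReach_fixed diz S)) (Finset.singleton_subset_iff.2 h) (pvN diz)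

theorem pvReach_child_subset_desc (diz : List (Int × List Int)) {c x : Int}
    (h : c ∈ pvChildF diz x) : pvReach diz {c} ⊆ pvReach diz (pvChildF diz x) :=
  pvAbsorb diz (le_of_eq (pvReach_fixed diz _))
    (Finset.singleton_subset_iff.2 (subset_pvIter diz _ (pvN diz) h)) (pvN diz)

theorem pvKeysF_get? (diz : List (Int × List Int)) (x : Int) (h : x ∈ pvKeysF diz) :
    ∃ cs, (PySem.Dict.mk diz).get? x = some cs := by
  unfold pvKeysF at h
  simp only [List.mem_toFinset, List.mem_map] at h
  rcases h with ⟨p, hp, hx⟩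
  induction diz with
  | nil => simp at hp
  | cons q rest ih =>
    rw [PySem.Dict.get?_mk_cons]
    by_cases hk : q.1 = x
    · simp [hk]
    · simp only [List.mem_cons] at hp
      rcases hp with h1 | h2
      · exact absurd (h1 ▸ hx) hk
      · simpa [show (q.1 == x) = false by simpa using hk] using ih h2

-- ---- sufficiency: under Pre_, fuel diz.length + 1 makes goA return ----

theorem suffQ (rec : Int → PySem.Dict Int Int → Int → Option (PySem.Dict Int Int))
    (cs : List Int) (H : ∀ c ∈ cs, ∀ d n, ∃ d', rec c d n = some d') :
    ∀ (j m : Nat), cs.length - m ≤ j → ∀ d n, ∃ d', goChildrenA rec cs m d n = some d' := by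
  intro j
  induction j with
  | zero =>
    intro m hm d n
    rw [goChildrenA]
    have : ¬ m < cs.length := by omega
    simp [this]
  | succ j ih =>
    intro m hm d n
    rw [goChildrenA]
    by_cases h : m < cs.length
    · simp only [h, dif_pos]
      have hget : PySem.List.pyGet? cs (m : Int) = some cs[m] :=
        PySem.List.pyGet?_ofNat cs m h
      rw [hget]
      simp only []
      obtain ⟨dmid, hmid⟩ := H cs[m] (List.getElem_mem h) d
        (if cs.length = 2 ∧ m = 0 then n + 1 else n)
      simp only [hmid]
      exact ih (m+1) (by omega) dmid _
    · simp [h]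

theorem suffP (diz : List (Int × List Int)) :
    ∀ (fuel : Nat) (node : Int),
      pvReach diz {node} ⊆ pvKeysF diz →
      (∀ x ∈ pvReach diz {node}, x ∉ pvReach diz (pvChildF diz x)) →
      (pvReach diz {node}).card ≤ fuel →
      ∀ d n, ∃ d', goA (PySem.Dict.mk diz) fuel node d n = some d' := by
  intro fuel
  induction fuel with
  | zero =>
    intro node _ _ hcard _ _
    exfalso
    have : 0 < (pvReach diz {node}).card :=
      Finset.card_pos.2 ⟨node, mem_pvReach_self diz node⟩
    omega
  | succ fuel ih =>
    intro node hkeys hacyc hcard d n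
    obtain ⟨cs, hcs⟩ := pvKeysF_get? diz node (hkeys (mem_pvReach_self diz node))
    simp only [goA, hcs]
    apply suffQ _ _ _ cs.length 0 (by omega)
    intro c hc d2 n2
    have hcF : c ∈ pvChildF diz node := by
      unfold pvChildF; rw [hcs]; simpa using hc
    have hsub : pvReach diz {c} ⊆ pvReach diz {node} :=
      pvReach_subset_of_mem diz (pvChildF_subset_reach diz node hcF)
    have hnotin : node ∉ pvReach diz {c} := fun hmem =>
      hacyc node (mem_pvReach_self diz node) (pvReach_child_subset_desc diz hcF hmem)
    have hlt : (pvReach diz {c}).card < (pvReach diz {node}).card :=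
      Finset.card_lt_card
        ((Finset.ssubset_iff_of_subset hsub).2 ⟨node, mem_pvReach_self diz node, hnotin⟩)
    exact ih c (hsub.trans hkeys) (fun x hx => hacyc x (hsub hx)) (by omega) d2 n2

-- ---- bridge: B's stack loop runs A's recursion ----

theorem foldr_push (cs : List Int) (g : Int) (rest : List (Int × Int)) :
    cs.foldr (fun c st => (c, g) :: st) rest = cs.map (fun c => (c, g)) ++ rest := by
  induction cs with
  | nil => rfl
  | cons c cs ih => simp [ih]

theorem bloopB_nil (diz : PySem.Dict Int (List Int)) (f : Nat) (d : PySem.Dict Int Int) :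
    bloopB diz f d [] = some d := by
  cases f <;> rfl

theorem csLen_le (diz : List (Int × List Int)) (x : Int) (cs : List Int)
    (h : (PySem.Dict.mk diz).get? x = some cs) : cs.length ≤ bmaxLen diz := by
  have hmem : cs.length ∈ diz.map (·.2.length) :=
    List.mem_map.2 ⟨(x, cs), mem_of_get?_mk h, rfl⟩
  exact (PySem.List.le_foldl_max (diz.map (·.2.length)) 0).2 _ hmem

theorem bridgeQ (diz : List (Int × List Int)) (fuel : Nat)
    (Hrec : ∀ (node : Int) (d : PySem.Dict Int Int) (n : Int) (d' : PySem.Dict Int Int),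
      goA (PySem.Dict.mk diz) fuel node d n = some d' →
      ∃ k, k ≤ (bmaxLen diz + 1) ^ fuel ∧ ∀ rest f,
        bloopB (PySem.Dict.mk diz) (k + f) d ((node, n) :: rest) = bloopB (PySem.Dict.mk diz) f d' rest)
    (cs : List Int) :
    ∀ (j m : Nat), cs.length - m ≤ j → 1 ≤ m →
      ∀ (d : PySem.Dict Int Int) (nn : Int) (d' : PySem.Dict Int Int),
        goChildrenA (goA (PySem.Dict.mk diz) fuel) cs m d nn = some d' →
        ∃ k, k ≤ (cs.length - m) * (bmaxLen diz + 1) ^ fuel ∧ ∀ rest f,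
          bloopB (PySem.Dict.mk diz) (k + f) d ((cs.drop m).map (fun c => (c, nn)) ++ rest) =
            bloopB (PySem.Dict.mk diz) f d' rest := by
  intro j
  induction j with
  | zero =>
    intro m hm _ d nn d' hgo
    rw [goChildrenA] at hgo
    have hnl : ¬ m < cs.length := by omega
    rw [dif_neg hnl] at hgo
    simp only [Option.some.injEq] at hgo
    subst hgo
    refine ⟨0, by omega, fun rest f => ?_⟩
    rw [List.drop_of_length_le (by omega)]
    simp
  | succ j ih =>
    intro m hm hm1 d nn d' hgo
    rw [goChildrenA] at hgo
    by_cases h : m < cs.length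
    · simp only [h, dif_pos] at hgo
      have hcond : ¬ (cs.length = 2 ∧ m = 0) := by omega
      rw [PySem.List.pyGet?_ofNat cs m h] at hgo
      simp only [hcond, if_false] at hgo
      cases hrec : goA (PySem.Dict.mk diz) fuel cs[m] d nn with
      | none => rw [hrec] at hgo; simp at hgo
      | some dmid =>
        rw [hrec] at hgo
        simp only [] at hgo
        obtain ⟨k1, hk1, hrun1⟩ := Hrec cs[m] d nn dmid hrec
        obtain ⟨k2, hk2, hrun2⟩ := ih (m+1) (by omega) (by omega) dmid nn d' hgo
        refine ⟨k1 + k2, ?_, fun rest f => ?_⟩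
        · have he : (cs.length - m) * (bmaxLen diz + 1) ^ fuel =
              (cs.length - (m+1)) * (bmaxLen diz + 1) ^ fuel + (bmaxLen diz + 1) ^ fuel := by
            have : cs.length - m = (cs.length - (m+1)) + 1 := by omega
            rw [this]; ring
          omega
        · have hdrop : cs.drop m = cs[m] :: cs.drop (m+1) := List.drop_eq_getElem_cons h
          rw [hdrop]
          simp only [List.map_cons, List.cons_append]
          have hassoc : k1 + k2 + f = k1 + (k2 + f) := by omega
          rw [hassoc, hrun1 _ (k2 + f), hrun2 rest f]
    · rw [dif_neg h] at hgo
      simp only [Option.some.injEq] at hgo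
      subst hgo
      refine ⟨0, by omega, fun rest f => ?_⟩
      rw [List.drop_of_length_le (by omega)]
      simp

theorem bridgeP (diz : List (Int × List Int)) :
    ∀ (fuel : Nat) (node : Int) (d : PySem.Dict Int Int) (n : Int) (d' : PySem.Dict Int Int),
      goA (PySem.Dict.mk diz) fuel node d n = some d' →
      ∃ k, k ≤ (bmaxLen diz + 1) ^ fuel ∧ ∀ rest f,
        bloopB (PySem.Dict.mk diz) (k + f) d ((node, n) :: rest) = bloopB (PySem.Dict.mk diz) f d' rest := by
  intro fuel
  induction fuel with
  | zero => intro node d n d' hgo; simp [goA] at hgo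
  | succ fuel ih =>
    intro node d n d' hgo
    simp only [goA] at hgo
    cases hcs : (PySem.Dict.mk diz).get? node with
    | none => rw [hcs] at hgo; simp at hgo
    | some cs =>
      rw [hcs] at hgo
      simp only [] at hgo
      have hone : 1 ≤ (bmaxLen diz + 1) ^ fuel := Nat.one_le_pow _ _ (by omega)
      have hpow : (bmaxLen diz + 1) ^ (fuel+1) = (bmaxLen diz + 1) ^ fuel * (bmaxLen diz + 1) :=
        pow_succ _ _
      cases cs with
      | nil =>
        rw [goChildrenA] at hgo
        rw [dif_neg (by simp : ¬ (0:Nat) < ([] : List Int).length)] at hgo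
        simp only [Option.some.injEq] at hgo
        have hone1 : 1 ≤ (bmaxLen diz + 1) ^ (fuel+1) := Nat.one_le_pow _ _ (by omega)
        refine ⟨1, hone1, fun rest f => ?_⟩
        have h1 : 1 + f = f + 1 := by omega
        rw [h1]
        simp only [bloopB, hcs]
        rw [hgo]
        simp
      | cons c cs' =>
        rw [goChildrenA] at hgo
        have hlt : 0 < (c :: cs').length := by simp
        rw [dif_pos hlt] at hgo
        rw [PySem.List.pyGet?_ofNat (c :: cs') 0 hlt] at hgo
        simp only [List.getElem_cons_zero, and_true] at hgo
        set childg := if (c :: cs').length = 2 then n + 1 else n with hchildg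
        cases hrec : goA (PySem.Dict.mk diz) fuel c (d.insert node n) childg with
        | none => rw [hrec] at hgo; simp at hgo
        | some dmid =>
          rw [hrec] at hgo
          simp only [] at hgo
          obtain ⟨k1, hk1, hrun1⟩ := ih c (d.insert node n) childg dmid hrec
          obtain ⟨k2, hk2, hrun2⟩ :=
            bridgeQ diz fuel ih (c :: cs') cs'.length 1 (by simp) (le_refl 1) dmid childg d' hgo
          have hlen : (c :: cs').length ≤ bmaxLen diz := csLen_le diz node _ hcs
          refine ⟨1 + k1 + k2, ?_, fun rest f => ?_⟩
          · have hsz : cs'.length + 1 ≤ bmaxLen diz := by simpa using hlen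
            have hk2' : k2 ≤ cs'.length * (bmaxLen diz + 1) ^ fuel := by
              have : (c :: cs').length - 1 = cs'.length := by simp
              rwa [this] at hk2
            have hmul : (cs'.length + 1) * (bmaxLen diz + 1) ^ fuel ≤
                bmaxLen diz * (bmaxLen diz + 1) ^ fuel :=
              Nat.mul_le_mul_right _ hsz
            have e1 : (cs'.length + 1) * (bmaxLen diz + 1) ^ fuel =
                cs'.length * (bmaxLen diz + 1) ^ fuel + (bmaxLen diz + 1) ^ fuel := by ring
            have e2 : (bmaxLen diz + 1) ^ fuel * (bmaxLen diz + 1) =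
                bmaxLen diz * (bmaxLen diz + 1) ^ fuel + (bmaxLen diz + 1) ^ fuel := by ring
            omega
          · have h1 : 1 + k1 + k2 + f = (k1 + (k2 + f)) + 1 := by omega
            rw [h1]
            simp only [bloopB, hcs]
            rw [foldr_push]
            have hmap : (c :: cs').map (fun x => (x, childg)) ++ rest =
                (c, childg) :: (cs'.map (fun x => (x, childg)) ++ rest) := by simp
            rw [hmap, hrun1 _ (k2 + f)]
            have hdrop : ((c :: cs').drop 1) = cs' := rfl
            have := hrun2 rest f
            rw [hdrop] at this
            exact this

-- ===== VERDICT (by name: the statement is the Claim_ definition above) =====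
theorem calc_ant_grad_spec : Claim_equal_calc_ant_grad := by
  intro r diz d n _ hpre
  unfold Spec_calc_ant_grad
  obtain ⟨hkeys, hacyc⟩ := hpre
  have hcard : (pvReach diz {r}).card ≤ diz.length + 1 := by
    have h1 : (pvReach diz {r}).card ≤ (pvKeysF diz).card := Finset.card_le_card hkeys
    have h2 : (pvKeysF diz).card ≤ (diz.map (·.1)).length := List.toFinset_card_le _
    simp at h2; omega
  obtain ⟨dA, hA⟩ := suffP diz (diz.length + 1) r hkeys hacyc hcard (PySem.Dict.mk d) n
  obtain ⟨k, hk, hrun⟩ := bridgeP diz (diz.length + 1) r (PySem.Dict.mk d) n dA hA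
  have hG : k + ((bmaxLen diz + 1) ^ (diz.length + 1) - k) = (bmaxLen diz + 1) ^ (diz.length + 1) := by omega
  have hB := hrun [] ((bmaxLen diz + 1) ^ (diz.length + 1) - k)
  rw [hG, bloopB_nil] at hB
  unfold calc_ant_grad calc_ant_grad_alt
  rw [hA, hB]
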